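-- pv_equiv track=rewrite | github.com/Horse64/core.horse64.org | tools/translator.py | mpath
-- ===== SOURCE A (Python) =====
-- def mpath(p, sep="/"):
--     if sep == "/":
--         p = p.replace("\\", "/")
--     parts = list(p.split(sep))
--     i = len(parts)
--     while i - 1 >= 0:
--         i -= 1
--         if (parts[i] == "main" and i >= 1 and
--                 parts[i - 1] == "horse_modules"):
--             break
--         if ("_" in parts[i] and
--                 parts[i].index("_") != parts[i].rindex("_") and
--                 i >= 1 and parts[i - 1] == "horse_modules"):
--             break
--         if parts[i] == "horse_modules":
--             break
--         if (not parts[i].startswith("_h64mod_") and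
--                 not parts[i] in {"__init__", "__init__.py"}):
--             parts[i] = "_h64mod_" + parts[i]
--     return sep.join(parts)
-- ===== SOURCE B (Python) =====
-- def mpath(p, sep="/"):
--     if sep == "/":
--         p = p.replace("\\", "/")
--     parts = p.split(sep)
--     out = []
--     prev = None
--     for i, x in enumerate(parts):
--         if x == "horse_modules" or (
--                 prev == "horse_modules" and
--                 (x == "main" or
--                  ("_" in x and x.find("_") != x.rfind("_")))):
--             # a stop fired here: everything up to and including this
--             # component stays untouched ("last reset wins")
--             out = parts[:i + 1]
--         elif x.startswith("_h64mod_") or x in ("__init__", "__init__.py"):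
--             out.append(x)
--         else:
--             out.append("_h64mod_" + x)
--         prev = x
--     return sep.join(out)
-- ===== Notes on version B (the rewrite author's own statement) =====
-- stated objective: alternative
-- what changed: A scans the components BACKWARD with a while-loop, mutating the list in place and breaking at the first stop condition; B makes one FORWARD pass with an accumulator and a previous-element variable, appending the prefixed component, and on a stop condition resetting the accumulator to the untouched prefix parts[:i+1] (last reset wins), so no backward search or break exists at all.
import Mathlib
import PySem

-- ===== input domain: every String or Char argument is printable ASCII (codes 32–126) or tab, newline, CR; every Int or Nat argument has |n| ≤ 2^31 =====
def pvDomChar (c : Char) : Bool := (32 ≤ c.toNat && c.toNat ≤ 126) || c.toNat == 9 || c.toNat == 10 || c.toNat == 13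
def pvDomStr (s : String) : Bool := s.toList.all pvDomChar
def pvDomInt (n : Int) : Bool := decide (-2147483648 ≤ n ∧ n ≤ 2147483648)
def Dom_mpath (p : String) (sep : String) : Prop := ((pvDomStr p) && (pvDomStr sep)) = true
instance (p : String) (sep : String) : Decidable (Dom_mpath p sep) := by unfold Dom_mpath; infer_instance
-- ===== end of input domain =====

-- B replaces A's backward mutate-and-break while-loop by ONE forward pass with an accumulator
-- and a previous-element variable, resetting the accumulator to the untouched prefix when a
-- stop condition fires ("last reset wins"). Alternative decomposition; return values only.

-- ===== PORT A =====
-- A's while-loop: counter n = number of indices still to visit; the index visited is n-1.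
-- parts[i] / parts[i-1] are always in range when read (the latter guarded by i >= 1), so getD is exact.
def mpathLoopA (parts : List String) : Nat → List String
  | 0 => parts
  | Nat.succ i =>
    let x := parts.getD i ""
    if x == "main" && decide (1 ≤ i) && parts.getD (i - 1) "" == "horse_modules" then
      parts
    else if PySem.Str.isIn "_" x && PySem.Str.find x "_" != PySem.Str.rfind x "_"
        && decide (1 ≤ i) && parts.getD (i - 1) "" == "horse_modules" then
      -- Python's x.index/.rindex are guarded by '"_" in x', where they equal find/rfind (exact)
      parts
    else if x == "horse_modules" then
      parts
    else if !(PySem.Str.startswith x "_h64mod_") && !(x == "__init__" || x == "__init__.py") then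
      mpathLoopA (parts.set i ("_h64mod_" ++ x)) i
    else
      mpathLoopA parts i

def mpath (p : String) (sep : String) : String :=
  let p := if sep == "/" then PySem.Str.replace p "\\" "/" else p
  match PySem.Str.split? p sep with
  | none => ""   -- empty separator: Python raises ValueError, excluded by Pre_mpath
  | some parts => PySem.Str.join sep (mpathLoopA parts parts.length)

-- ===== PORT B =====
-- Source B's loop body: state = (out, prev); enumerate yields (i, x) with i ≥ 0,
-- so parts[:i+1] is exactly parts.take ((i+1).toNat).
def stepB (parts : List String) (st : List String × Option String) (ix : Int × String) :
    List String × Option String :=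
  let x := ix.2
  if x == "horse_modules"
      || (st.2 == some "horse_modules"
          && (x == "main"
              || (PySem.Str.isIn "_" x && PySem.Str.find x "_" != PySem.Str.rfind x "_"))) then
    (parts.take (ix.1 + 1).toNat, some x)
  else if PySem.Str.startswith x "_h64mod_" || (x == "__init__" || x == "__init__.py") then
    (st.1 ++ [x], some x)
  else
    (st.1 ++ ["_h64mod_" ++ x], some x)

def mpath_alt (p : String) (sep : String) : String :=
  let p := if sep == "/" then PySem.Str.replace p "\\" "/" else p
  match PySem.Str.split? p sep with
  | none => ""   -- empty separator: Python raises ValueError, excluded by Pre_mpath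
  | some parts =>
    PySem.Str.join sep ((PySem.List.enumerate parts).foldl (stepB parts) ([], none)).1

-- ===== PRECONDITION & SPEC =====
-- Pre_ excludes exactly the empty separator, where Python's str.split raises ValueError (in both A and B).
def Pre_mpath (p : String) (sep : String) : Prop := sep ≠ ""
instance (p : String) (sep : String) : Decidable (Pre_mpath p sep) := by unfold Pre_mpath; infer_instance
def pvWitness_mpath : String × String := ("a/horse_modules/pkg/main.h64", "/")

def Spec_mpath (p : String) (sep : String) (out : String) : Prop := out = mpath_alt p sep
instance (p : String) (sep : String) (out : String) : Decidable (Spec_mpath p sep out) := by unfold Spec_mpath; infer_instance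

-- ===== CLAIM (what is proved, stated in full; the proofs are below) =====
def Claim_equal_mpath : Prop := ∀ (p : String) (sep : String), Dom_mpath p sep → Pre_mpath p sep → Spec_mpath p sep (mpath p sep)

-- ===== LEMMAS AND PROOFS =====

-- proof-side vocabulary: the element rule, the stop test at an index, and the last stop index < n
def prefB (x : String) : String :=
  if PySem.Str.startswith x "_h64mod_" || (x == "__init__" || x == "__init__.py") then x
  else "_h64mod_" ++ x

def stopsB (parts : List String) (i : Nat) : Bool :=
  if parts.getD i "" == "horse_modules" then true
  else if decide (1 ≤ i) && parts.getD (i - 1) "" == "horse_modules" then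
    parts.getD i "" == "main"
      || (PySem.Str.isIn "_" (parts.getD i "") &&
          PySem.Str.find (parts.getD i "") "_" != PySem.Str.rfind (parts.getD i "") "_")
  else false

def findStopB (parts : List String) : Nat → Option Nat
  | 0 => none
  | Nat.succ i => if stopsB parts i then some i else findStopB parts i

-- B's stop test equals the disjunction of A's three break tests (on the same list).
theorem stopsB_eq (parts : List String) (i : Nat) :
    stopsB parts i =
      ((parts.getD i "" == "main" && decide (1 ≤ i) && parts.getD (i - 1) "" == "horse_modules")
        || (PySem.Str.isIn "_" (parts.getD i "")
            && PySem.Str.find (parts.getD i "") "_" != PySem.Str.rfind (parts.getD i "") "_"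
            && decide (1 ≤ i) && parts.getD (i - 1) "" == "horse_modules")
        || (parts.getD i "" == "horse_modules")) := by
  unfold stopsB
  cases h1 : (parts.getD i "" == "horse_modules") <;>
    cases h2 : (decide (1 ≤ i) && parts.getD (i - 1) "" == "horse_modules") <;>
      simp_all

-- the current list A's loop holds at counter n: indices ≥ n already rewritten
def curA (parts : List String) (n : Nat) : List String :=
  parts.take n ++ (parts.drop n).map prefB

theorem curA_getD (parts : List String) (n i : Nat) (hi : i < n) (hn : n ≤ parts.length) :
    (curA parts n).getD i "" = parts.getD i "" := by
  unfold curA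
  have hlen : i < (parts.take n).length := by simp; omega
  rw [List.getD_append _ _ _ _ hlen]
  simp [List.getD, hi]

theorem curA_step (parts : List String) (i : Nat) (hi : i < parts.length) :
    curA parts i = parts.take i ++ prefB (parts.getD i "") :: (parts.drop (i + 1)).map prefB := by
  unfold curA
  rw [List.drop_eq_getElem_cons hi, List.map_cons]
  have hg : parts.getD i "" = parts[i] := by simp [List.getD, List.getElem?_eq_getElem hi]
  rw [hg]

theorem curA_set (parts : List String) (i : Nat) (hi : i < parts.length) (v : String) :
    (curA parts (i + 1)).set i v = parts.take i ++ v :: (parts.drop (i + 1)).map prefB := by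
  unfold curA
  have ht : parts.take (i + 1) = parts.take i ++ [parts[i]] := by
    rw [List.take_succ]; simp [List.getElem?_eq_getElem hi]
  have hlen : (parts.take i).length = i := by simp; omega
  rw [ht, List.append_assoc, List.set_append_right _ _ (by omega)]
  rw [hlen, Nat.sub_self]
  rfl

-- Main invariant for A's loop, started at counter n on the partially rewritten list.
theorem loop_eq (parts : List String) :
    ∀ n, n ≤ parts.length →
      mpathLoopA (curA parts n) n =
        match findStopB parts n with
        | some s => parts.take (s + 1) ++ (parts.drop (s + 1)).map prefB
        | none => parts.map prefB := by
  intro n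
  induction n with
  | zero => intro _; simp [mpathLoopA, findStopB, curA]
  | succ i ih =>
    intro hn
    have hi : i < parts.length := by omega
    have hx : (curA parts (i + 1)).getD i "" = parts.getD i "" :=
      curA_getD parts (i + 1) i (by omega) hn
    have hd : ∀ a : Bool,
        (a && decide (1 ≤ i) && ((curA parts (i + 1)).getD (i - 1) "" == "horse_modules"))
          = (a && decide (1 ≤ i) && (parts.getD (i - 1) "" == "horse_modules")) := by
      intro a
      by_cases h : 1 ≤ i
      · rw [curA_getD parts (i + 1) (i - 1) (by omega) hn]
      · have hd0 : decide (1 ≤ i) = false := by simp; omega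
        simp [hd0]
    rw [findStopB, stopsB_eq]
    simp only [mpathLoopA, hx, hd]
    by_cases c1 : (parts.getD i "" == "main" && decide (1 ≤ i)
        && (parts.getD (i - 1) "" == "horse_modules")) = true
    · rw [if_pos c1, if_pos (show _ = true by rw [c1]; rfl)]
      rfl
    · have c1f : (parts.getD i "" == "main" && decide (1 ≤ i)
          && (parts.getD (i - 1) "" == "horse_modules")) = false := Bool.eq_false_iff.mpr c1
      rw [if_neg c1]
      by_cases c2 : (PySem.Str.isIn "_" (parts.getD i "")
          && PySem.Str.find (parts.getD i "") "_" != PySem.Str.rfind (parts.getD i "") "_"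
          && decide (1 ≤ i) && (parts.getD (i - 1) "" == "horse_modules")) = true
      · rw [if_pos c2, if_pos (show _ = true by rw [c1f, c2]; rfl)]
        rfl
      · have c2f : (PySem.Str.isIn "_" (parts.getD i "")
            && PySem.Str.find (parts.getD i "") "_" != PySem.Str.rfind (parts.getD i "") "_"
            && decide (1 ≤ i) && (parts.getD (i - 1) "" == "horse_modules")) = false :=
          Bool.eq_false_iff.mpr c2
        rw [if_neg c2]
        by_cases c3 : (parts.getD i "" == "horse_modules") = true
        · rw [if_pos c3, if_pos (show _ = true by rw [c1f, c2f, c3]; rfl)]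
          rfl
        · have c3f : (parts.getD i "" == "horse_modules") = false := Bool.eq_false_iff.mpr c3
          rw [if_neg c3, c1f, c2f, c3f]
          simp only [Bool.false_or]
          rw [if_neg Bool.false_ne_true]
          by_cases c4 : (!PySem.Str.startswith (parts.getD i "") "_h64mod_"
              && !(parts.getD i "" == "__init__" || parts.getD i "" == "__init__.py")) = true
          · have hc : (PySem.Str.startswith (parts.getD i "") "_h64mod_"
                || (parts.getD i "" == "__init__" || parts.getD i "" == "__init__.py")) = false := by
              revert c4
              cases PySem.Str.startswith (parts.getD i "") "_h64mod_" <;>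
                cases (parts.getD i "" == "__init__" || parts.getD i "" == "__init__.py") <;> simp
            have hpref : prefB (parts.getD i "") = "_h64mod_" ++ parts.getD i "" := by
              unfold prefB; rw [hc]; rfl
            rw [if_pos c4, curA_set parts i hi, ← hpref, ← curA_step parts i hi]
            exact ih (by omega)
          · have hc : (PySem.Str.startswith (parts.getD i "") "_h64mod_"
                || (parts.getD i "" == "__init__" || parts.getD i "" == "__init__.py")) = true := by
              revert c4
              cases PySem.Str.startswith (parts.getD i "") "_h64mod_" <;>
                cases (parts.getD i "" == "__init__" || parts.getD i "" == "__init__.py") <;> simp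
            have hpref : prefB (parts.getD i "") = parts.getD i "" := by
              unfold prefB; rw [hc]; rfl
            have hcur : curA parts (i + 1) = curA parts i := by
              rw [curA_step parts i hi, hpref]
              unfold curA
              rw [List.take_succ, List.getElem?_eq_getElem hi]
              have hg : parts.getD i "" = parts[i] := by
                simp [List.getD, List.getElem?_eq_getElem hi]
              rw [hg]
              simp
              rw [show List.take (i + 1) parts = List.take i parts ++ [parts[i]] from by
                    rw [List.take_succ]; simp [List.getElem?_eq_getElem hi],
                  List.append_assoc]
              rfl
            rw [if_neg c4, hcur]
            exact ih (by omega)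

-- findStopB parts n only returns indices below n
theorem findStopB_lt (parts : List String) :
    ∀ n s, findStopB parts n = some s → s < n := by
  intro n
  induction n with
  | zero => intro s h; simp [findStopB] at h
  | succ i ih =>
    intro s h
    unfold findStopB at h
    by_cases hc : stopsB parts i = true
    · rw [if_pos hc] at h; injection h with h; omega
    · rw [if_neg hc] at h; exact Nat.lt_succ_of_lt (ih s h)

-- B's fold invariant: after the first n elements, out is the stop-index decomposition of
-- the prefix and prev is the last element seen.
theorem fold_eq (parts : List String) :
    ∀ n, n ≤ parts.length →
      (PySem.List.enumerate (parts.take n)).foldl (stepB parts) ([], none) =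
        ((match findStopB parts n with
          | some s => parts.take (s + 1) ++ ((parts.take n).drop (s + 1)).map prefB
          | none => (parts.take n).map prefB),
         (if h : 0 < n then some (parts.getD (n - 1) "") else none)) := by
  intro n
  induction n with
  | zero => intro _; simp [PySem.List.enumerate_nil, findStopB]
  | succ i ih =>
    intro hn
    have hi : i < parts.length := by omega
    have htake : parts.take (i + 1) = parts.take i ++ [parts[i]] := by
      rw [List.take_succ]; simp [List.getElem?_eq_getElem hi]
    have hlen : (parts.take i).length = i := by simp; omega
    have henum : PySem.List.enumerate (parts.take (i + 1)) 0 =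
        PySem.List.enumerate (parts.take i) 0 ++ [((i : Int), parts[i])] := by
      rw [htake, PySem.List.enumerate_append]
      simp [PySem.List.enumerate_cons, PySem.List.enumerate_nil, hlen]
    have hg : parts.getD i "" = parts[i] := by
      simp [List.getD, List.getElem?_eq_getElem hi]
    have hprev : (if h : 0 < i then some (parts.getD (i - 1) "") else none) =
        (if i = 0 then none else some (parts.getD (i - 1) "")) := by
      by_cases h0 : 0 < i
      · rw [dif_pos h0, if_neg (by omega)]
      · rw [dif_neg h0, if_pos (by omega)]
    -- stepB's stop test at (prev_i, parts[i]) equals stopsB parts i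
    have hstop : ((parts[i] == "horse_modules")
        || ((if h : 0 < i then some (parts.getD (i - 1) "") else none) == some "horse_modules"
            && (parts[i] == "main"
                || (PySem.Str.isIn "_" parts[i]
                    && PySem.Str.find parts[i] "_" != PySem.Str.rfind parts[i] "_"))))
        = stopsB parts i := by
      unfold stopsB
      rw [hg]
      by_cases h0 : 0 < i
      · rw [dif_pos h0]
        have : decide (1 ≤ i) = true := by simp; omega
        rw [this]
        cases hh : (parts.getD (i - 1) "" == "horse_modules") <;>
          cases hm : (parts[i] == "horse_modules") <;> simp_all
      · rw [dif_neg h0]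
        have : decide (1 ≤ i) = false := by simp; omega
        rw [this]
        cases hm : (parts[i] == "horse_modules") <;> simp_all
    rw [henum, List.foldl_append, ih (by omega)]
    show stepB parts _ _ = _
    unfold stepB
    simp only []
    rw [hstop]
    by_cases hs : stopsB parts i = true
    · rw [if_pos hs]
      have hfs : findStopB parts (i + 1) = some i := by
        rw [show findStopB parts (i + 1) = if stopsB parts i then some i else findStopB parts i
              from rfl, if_pos hs]
      rw [hfs]
      have ht1 : ((i : Int) + 1).toNat = i + 1 := by omega
      rw [ht1]
      dsimp only
      have hnil : (parts.take (i + 1)).drop (i + 1) = [] :=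
        List.drop_eq_nil_of_le (by simp)
      rw [hnil, List.map_nil, List.append_nil, dif_pos (Nat.succ_pos i)]
      rw [show i + 1 - 1 = i from rfl, hg]
    · rw [if_neg hs]
      have hfs : findStopB parts (i + 1) = findStopB parts i := by
        rw [show findStopB parts (i + 1) = if stopsB parts i then some i else findStopB parts i
              from rfl, if_neg hs]
      rw [hfs]
      have hout : ∀ v,
          ((match findStopB parts i with
            | some s => parts.take (s + 1) ++ ((parts.take i).drop (s + 1)).map prefB
            | none => (parts.take i).map prefB) ++ [v], some parts[i]) =
          ((match findStopB parts i with
            | some s => parts.take (s + 1) ++ ((parts.take (i + 1)).drop (s + 1)).map (fun y => prefB y)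
            | none => (parts.take (i + 1)).map prefB),
           (if h : 0 < i + 1 then some (parts.getD (i + 1 - 1) "") else none)) →
          v = prefB parts[i] ∨ True := fun _ _ => Or.inr trivial
      clear hout
      have hgoal : ∀ v, v = prefB parts[i] →
          ((match findStopB parts i with
            | some s => parts.take (s + 1) ++ ((parts.take i).drop (s + 1)).map prefB
            | none => (parts.take i).map prefB) ++ [v], (some parts[i] : Option String)) =
          ((match findStopB parts (i + 1 - 1) with
            | some s => parts.take (s + 1) ++ ((parts.take (i + 1)).drop (s + 1)).map prefB
            | none => (parts.take (i + 1)).map prefB),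
           (if h : 0 < i + 1 then some (parts.getD (i + 1 - 1) "") else none)) := by
        intro v hv
        have hps : (if h : 0 < i + 1 then some (parts.getD (i + 1 - 1) "") else none)
            = some parts[i] := by
          rw [dif_pos (by omega), show i + 1 - 1 = i from rfl, hg]
        rw [hps, hv]
        congr 1
        show _ = (match findStopB parts i with
            | some s => parts.take (s + 1) ++ ((parts.take (i + 1)).drop (s + 1)).map prefB
            | none => (parts.take (i + 1)).map prefB)
        cases hf : findStopB parts i with
        | none =>
          dsimp only
          rw [htake, List.map_append, List.map_cons, List.map_nil]
        | some s =>
          have hsl : s < i := findStopB_lt parts i s hf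
          have hdrop : (parts.take (i + 1)).drop (s + 1)
              = (parts.take i).drop (s + 1) ++ [parts[i]] := by
            rw [htake, List.drop_append_of_le_length (by omega)]
          dsimp only
          rw [hdrop, List.map_append, List.map_cons, List.map_nil, List.append_assoc]
      -- dispatch both non-stop branches through hgoal with the right element value
      by_cases hc : (PySem.Str.startswith parts[i] "_h64mod_"
          || (parts[i] == "__init__" || parts[i] == "__init__.py")) = true
      · rw [if_pos hc]
        exact hgoal parts[i] (by unfold prefB; rw [if_pos hc])
      · rw [if_neg hc]
        exact hgoal ("_h64mod_" ++ parts[i]) (by unfold prefB; rw [if_neg hc])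

-- ===== VERDICT (by name: the statement is the Claim_ definition above) =====
theorem mpath_spec : Claim_equal_mpath := by
  intro p sep _ _
  unfold Spec_mpath
  simp only [mpath, mpath_alt]
  cases hs : PySem.Str.split? (if sep == "/" then PySem.Str.replace p "\\" "/" else p) sep with
  | none => rfl
  | some parts =>
    dsimp only
    have hA := loop_eq parts parts.length le_rfl
    have hc : curA parts parts.length = parts := by unfold curA; simp
    rw [hc] at hA
    have hB := fold_eq parts parts.length le_rfl
    rw [List.take_length] at hB
    rw [hA, hB]
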